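-- pv_equiv track=rewrite | github.com/Faraday-AI/Faraday-AI | app/dashboard/services/ai_widget_service.py | _generate_anomaly_recommendations
-- ===== SOURCE A (Python) =====
-- from typing import Dict, List, Optional, Any
--
-- def _generate_anomaly_recommendations(anomalies: List[Dict]) -> List[str]:
--     """Generate recommendations based on detected anomalies."""
--     recommendations = []
--
--     high_severity = [a for a in anomalies if a.get("severity") == "high"]
--     if high_severity:
--         recommendations.append("Immediate attention recommended for high-severity anomalies")
--         recommendations.append("Review student data and consider intervention")
--
--     performance_anomalies = [a for a in anomalies if a.get("type") == "performance_outlier"]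
--     if performance_anomalies:
--         recommendations.append("Performance anomalies detected - review recent assessments")
--
--     attendance_anomalies = [a for a in anomalies if a.get("type") == "attendance_drop"]
--     if attendance_anomalies:
--         recommendations.append("Attendance drop detected - contact student/parent if needed")
--
--     return recommendations if recommendations else ["No immediate action required"]
-- ===== SOURCE B (Python) =====
-- # Table-driven rewrite: each anomaly is mapped to the rule tags it triggers,
-- # the union of tags is taken, and the recommendation text lives in a declarative
-- # rules table keyed by tag.
--
-- _RULES = [
--     ("high_severity", ["Immediate attention recommended for high-severity anomalies",
--                        "Review student data and consider intervention"]),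
--     ("performance", ["Performance anomalies detected - review recent assessments"]),
--     ("attendance", ["Attendance drop detected - contact student/parent if needed"]),
-- ]
--
-- def _tags(a):
--     """Tags triggered by a single anomaly record."""
--     tags = []
--     if a.get("severity") == "high":
--         tags.append("high_severity")
--     t = a.get("type")
--     if t == "performance_outlier":
--         tags.append("performance")
--     elif t == "attendance_drop":
--         tags.append("attendance")
--     return tags
--
-- def _generate_anomaly_recommendations(anomalies):
--     triggered = {tag for a in anomalies for tag in _tags(a)}
--     recs = [msg for tag, msgs in _RULES if tag in triggered for msg in msgs]
--     return recs if recs else ["No immediate action required"]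
-- ===== Notes on version B (the rewrite author's own statement) =====
-- stated objective: alternative
-- what changed: Replaces A's three per-recommendation filtering scans with a table-driven design: each anomaly is mapped to the set of rule tags it triggers, and the recommendations are emitted by iterating a declarative rules table against that tag set.
import Mathlib
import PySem

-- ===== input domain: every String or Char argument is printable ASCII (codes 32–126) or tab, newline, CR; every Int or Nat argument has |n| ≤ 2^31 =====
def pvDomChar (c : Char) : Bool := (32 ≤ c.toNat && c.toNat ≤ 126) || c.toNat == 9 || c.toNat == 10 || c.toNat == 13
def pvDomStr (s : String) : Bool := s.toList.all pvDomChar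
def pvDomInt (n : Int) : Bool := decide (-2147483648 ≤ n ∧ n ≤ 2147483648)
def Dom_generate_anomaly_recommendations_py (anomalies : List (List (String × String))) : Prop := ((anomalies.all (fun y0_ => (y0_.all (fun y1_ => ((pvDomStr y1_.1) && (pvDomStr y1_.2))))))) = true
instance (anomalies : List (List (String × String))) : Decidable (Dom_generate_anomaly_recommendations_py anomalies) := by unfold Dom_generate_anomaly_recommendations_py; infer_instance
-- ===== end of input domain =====

-- B replaces A's three filtering passes by a tag-set + declarative rules table (objective: alternative).


-- ===== PORT A =====
-- a.get(k) on the association-list dict: first-match lookup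
def pvGetKey (a : List (String × String)) (k : String) : Option String :=
  (PySem.Dict.mk a).get? k

def generate_anomaly_recommendations_py (anomalies : List (List (String × String))) : List String :=
  let recommendations : List String := []
  let high_severity := anomalies.filter (fun a => pvGetKey a "severity" == some "high")
  let recommendations := if high_severity ≠ [] then
      recommendations ++ ["Immediate attention recommended for high-severity anomalies",
                          "Review student data and consider intervention"]
    else recommendations
  let performance_anomalies := anomalies.filter (fun a => pvGetKey a "type" == some "performance_outlier")
  let recommendations := if performance_anomalies ≠ [] then
      recommendations ++ ["Performance anomalies detected - review recent assessments"]
    else recommendations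
  let attendance_anomalies := anomalies.filter (fun a => pvGetKey a "type" == some "attendance_drop")
  let recommendations := if attendance_anomalies ≠ [] then
      recommendations ++ ["Attendance drop detected - contact student/parent if needed"]
    else recommendations
  if recommendations ≠ [] then recommendations else ["No immediate action required"]

-- ===== PORT B =====
-- the declarative rules table of Source B
def pvRules : List (String × List String) :=
  [("high_severity", ["Immediate attention recommended for high-severity anomalies",
                      "Review student data and consider intervention"]),
   ("performance", ["Performance anomalies detected - review recent assessments"]),
   ("attendance", ["Attendance drop detected - contact student/parent if needed"])]

-- _tags(a): the rule tags one anomaly triggers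
def pvTags (a : List (String × String)) : List String :=
  let tags : List String := []
  let tags := if pvGetKey a "severity" == some "high" then tags ++ ["high_severity"] else tags
  let t := pvGetKey a "type"
  if t == some "performance_outlier" then tags ++ ["performance"]
  else if t == some "attendance_drop" then tags ++ ["attendance"]
  else tags

def generate_anomaly_recommendations_py_alt (anomalies : List (List (String × String))) : List String :=
  -- {tag for a in anomalies for tag in _tags(a)}
  let triggered : PySem.Set String := PySem.Set.ofList (anomalies.flatMap pvTags)
  -- [msg for tag, msgs in _RULES if tag in triggered for msg in msgs]
  let recs := pvRules.flatMap (fun r => if PySem.Set.contains triggered r.1 then r.2 else [])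
  if recs ≠ [] then recs else ["No immediate action required"]

-- ===== PRECONDITION & SPEC =====
def Spec_generate_anomaly_recommendations_py (anomalies : List (List (String × String))) (out : List String) : Prop := out = generate_anomaly_recommendations_py_alt anomalies
instance (anomalies : List (List (String × String))) (out : List String) : Decidable (Spec_generate_anomaly_recommendations_py anomalies out) := by unfold Spec_generate_anomaly_recommendations_py; infer_instance

-- ===== CLAIM (what is proved, stated in full; the proofs are below) =====
def Claim_equal_generate_anomaly_recommendations_py : Prop := ∀ (anomalies : List (List (String × String))), Dom_generate_anomaly_recommendations_py anomalies → Spec_generate_anomaly_recommendations_py anomalies (generate_anomaly_recommendations_py anomalies)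

-- ===== LEMMAS AND PROOFS =====

-- membership of a tag in the collected tag list ↔ some anomaly triggers it
theorem pvMem_tags_high (a : List (String × String)) :
    ("high_severity" ∈ pvTags a) ↔ (pvGetKey a "severity" == some "high") = true := by
  unfold pvTags
  by_cases h1 : (pvGetKey a "severity" == some "high") = true <;>
    by_cases h2 : (pvGetKey a "type" == some "performance_outlier") = true <;>
      by_cases h3 : (pvGetKey a "type" == some "attendance_drop") = true <;>
        first
          | exact absurd ((beq_iff_eq.mp h2).symm.trans (beq_iff_eq.mp h3)) (by simp)
          | simp [h1, h2, h3]

theorem pvMem_tags_perf (a : List (String × String)) :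
    ("performance" ∈ pvTags a) ↔ (pvGetKey a "type" == some "performance_outlier") = true := by
  unfold pvTags
  by_cases h1 : (pvGetKey a "severity" == some "high") = true <;>
    by_cases h2 : (pvGetKey a "type" == some "performance_outlier") = true <;>
      by_cases h3 : (pvGetKey a "type" == some "attendance_drop") = true <;>
        first
          | exact absurd ((beq_iff_eq.mp h2).symm.trans (beq_iff_eq.mp h3)) (by simp)
          | simp [h1, h2, h3]

theorem pvMem_tags_att (a : List (String × String)) :
    ("attendance" ∈ pvTags a) ↔ (pvGetKey a "type" == some "attendance_drop") = true := by
  unfold pvTags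
  by_cases h1 : (pvGetKey a "severity" == some "high") = true <;>
    by_cases h2 : (pvGetKey a "type" == some "performance_outlier") = true <;>
      by_cases h3 : (pvGetKey a "type" == some "attendance_drop") = true <;>
        first
          | exact absurd ((beq_iff_eq.mp h2).symm.trans (beq_iff_eq.mp h3)) (by simp)
          | simp [h1, h2, h3]

theorem pvContains_triggered (anomalies : List (List (String × String))) (tag : String) :
    PySem.Set.contains (PySem.Set.ofList (anomalies.flatMap pvTags)) tag =
      anomalies.any (fun a => decide (tag ∈ pvTags a)) := by
  rw [Bool.eq_iff_iff]
  simp [PySem.Set.mem_ofList, List.mem_flatMap, List.any_eq_true]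

theorem pvFilter_ne_any (anomalies : List (List (String × String)))
    (p : List (String × String) → Bool) :
    (anomalies.filter p ≠ []) ↔ anomalies.any p = true := by
  simp [List.filter_eq_nil_iff, List.any_eq_true]

-- ===== VERDICT (by name: the statement is the Claim_ definition above) =====
theorem generate_anomaly_recommendations_py_spec : Claim_equal_generate_anomaly_recommendations_py := by
  intro anomalies _
  unfold Spec_generate_anomaly_recommendations_py
  unfold generate_anomaly_recommendations_py generate_anomaly_recommendations_py_alt pvRules
  simp only [List.flatMap_cons, List.flatMap_nil, List.append_nil, pvContains_triggered,
    pvFilter_ne_any]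
  have e1 : (anomalies.any fun a => decide ("high_severity" ∈ pvTags a)) =
      anomalies.any (fun a => pvGetKey a "severity" == some "high") := by
    congr 1; funext a; rw [Bool.eq_iff_iff]; simp [pvMem_tags_high]
  have e2 : (anomalies.any fun a => decide ("performance" ∈ pvTags a)) =
      anomalies.any (fun a => pvGetKey a "type" == some "performance_outlier") := by
    congr 1; funext a; rw [Bool.eq_iff_iff]; simp [pvMem_tags_perf]
  have e3 : (anomalies.any fun a => decide ("attendance" ∈ pvTags a)) =
      anomalies.any (fun a => pvGetKey a "type" == some "attendance_drop") := by
    congr 1; funext a; rw [Bool.eq_iff_iff]; simp [pvMem_tags_att]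
  rw [e1, e2, e3]
  by_cases h1 : anomalies.any (fun a => pvGetKey a "severity" == some "high") = true <;>
    by_cases h2 : anomalies.any (fun a => pvGetKey a "type" == some "performance_outlier") = true <;>
      by_cases h3 : anomalies.any (fun a => pvGetKey a "type" == some "attendance_drop") = true <;>
        simp [h1, h2, h3]
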